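-- pv_equiv track=rewrite | github.com/Extra-Chill/homeboy-extensions | wordpress/scripts/refactor.py | function_name_to_trait_name
-- ===== SOURCE A (Python) =====
-- def function_name_to_trait_name(function_name):
--     """Convert a function name to a trait name.
--
--     checkPermission -> HasCheckPermission
--     __construct -> HasSharedConstructor
--     register -> HasRegister
--     get_config -> HasGetConfig
--     httpGet -> HasHttpGet
--     """
--     if function_name == '__construct':
--         return 'HasSharedConstructor'
--
--     # If already camelCase/PascalCase, just uppercase the first letter
--     if '_' not in function_name:
--         return f'Has{function_name[0].upper()}{function_name[1:]}'
--
--     # Convert snake_case to PascalCase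
--     parts = function_name.split('_')
--     pascal = ''.join(p.capitalize() for p in parts if p)
--
--     return f'Has{pascal}'
-- ===== SOURCE B (Python) =====
-- def function_name_to_trait_name(function_name):
--     if function_name == '__construct':
--         return 'HasSharedConstructor'
--     if '_' not in function_name:
--         return 'Has' + function_name[0].upper() + function_name[1:]
--     out = []
--     start = True
--     for ch in function_name:
--         if ch == '_':
--             start = True
--         else:
--             out.append(ch.upper() if start else ch.lower())
--             start = False
--     return 'Has' + ''.join(out)
-- ===== Notes on version B (the rewrite author's own statement) =====
-- stated objective: alternative
-- what changed: The snake_case branch's split-on-underscore / per-part capitalize() / join pipeline is replaced by a single left-to-right character scan carrying a start-of-word flag that uppercases word-initial characters and lowercases the rest.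
import Mathlib
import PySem

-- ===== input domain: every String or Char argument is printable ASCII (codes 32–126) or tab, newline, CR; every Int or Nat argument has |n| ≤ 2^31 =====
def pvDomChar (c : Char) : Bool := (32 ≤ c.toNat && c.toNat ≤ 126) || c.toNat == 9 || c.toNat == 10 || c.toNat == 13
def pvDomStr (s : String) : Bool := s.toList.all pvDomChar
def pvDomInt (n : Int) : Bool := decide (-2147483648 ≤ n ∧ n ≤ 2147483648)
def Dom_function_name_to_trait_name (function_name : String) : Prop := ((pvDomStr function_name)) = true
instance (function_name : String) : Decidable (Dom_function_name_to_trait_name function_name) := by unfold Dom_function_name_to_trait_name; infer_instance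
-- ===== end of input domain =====

-- B replaces A's split('_')/capitalize()/join pipeline by a single character scan with a
-- start-of-word flag (alternative decomposition, same cost); both raise IndexError on "",
-- which Pre_ excludes.


-- ===== PORT A =====
-- str.capitalize(), hand-ported (PySem has no capitalize): first char uppercased, rest
-- lowercased — exact on the ASCII domain (where title-casing = upper-casing).
def pyCapitalize (cs : List Char) : List Char :=
  match cs with
  | [] => []
  | c :: rest => PySem.Chars.upperChar c :: PySem.Chars.lower rest

def function_name_to_trait_name (function_name : String) : String :=
  if function_name = "__construct" then "HasSharedConstructor"
  else if PySem.Str.isIn "_" function_name = false then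
    -- f'Has{function_name[0].upper()}{function_name[1:]}'
    match PySem.List.pyGet? function_name.toList 0 with
    | some c => String.mk ("Has".toList ++ PySem.Chars.upperChar c ::
        PySem.Chars.slice function_name.toList (some 1) none)
    | none => "Has"  -- unreachable under Pre_: Python raises IndexError here
  else
    -- parts = function_name.split('_'); pascal = ''.join(p.capitalize() for p in parts if p)
    let parts := PySem.Chars.splitOn function_name.toList "_".toList
    String.mk ("Has".toList ++
      PySem.Chars.join [] ((parts.filter (fun p => p ≠ [])).map pyCapitalize))

-- ===== PORT B =====
-- one step of B's loop: state = (emitted chars, start-of-word flag)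
def altStep (acc : List Char × Bool) (c : Char) : List Char × Bool :=
  if c = '_' then (acc.1, true)
  else (acc.1 ++ [if acc.2 then PySem.Chars.upperChar c else PySem.Chars.lowerChar c], false)

def function_name_to_trait_name_alt (function_name : String) : String :=
  if function_name = "__construct" then "HasSharedConstructor"
  else if PySem.Str.isIn "_" function_name = false then
    match PySem.List.pyGet? function_name.toList 0 with
    | some c => String.mk ("Has".toList ++ PySem.Chars.upperChar c ::
        PySem.Chars.slice function_name.toList (some 1) none)
    | none => "Has"  -- unreachable under Pre_: Python raises IndexError here
  else
    String.mk ("Has".toList ++ (function_name.toList.foldl altStep ([], true)).1)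

-- ===== PRECONDITION & SPEC =====
-- Pre_ excludes only the empty string, on which both A and B raise IndexError.
def Pre_function_name_to_trait_name (function_name : String) : Prop := function_name ≠ ""
instance (function_name : String) : Decidable (Pre_function_name_to_trait_name function_name) := by unfold Pre_function_name_to_trait_name; infer_instance
def pvWitness_function_name_to_trait_name : String := "get_config"

def Spec_function_name_to_trait_name (function_name : String) (out : String) : Prop := out = function_name_to_trait_name_alt function_name
instance (function_name : String) (out : String) : Decidable (Spec_function_name_to_trait_name function_name out) := by unfold Spec_function_name_to_trait_name; infer_instance

-- ===== CLAIM (what is proved, stated in full; the proofs are below) =====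
def Claim_equal_function_name_to_trait_name : Prop := ∀ (function_name : String), Dom_function_name_to_trait_name function_name → Pre_function_name_to_trait_name function_name → Spec_function_name_to_trait_name function_name (function_name_to_trait_name function_name)

-- ===== LEMMAS AND PROOFS =====

-- proof-only simple recursive form of split on a single underscore
def splitSimple : List Char → List Char → List (List Char)
  | [], cur => [cur.reverse]
  | c :: t, cur => if c = '_' then cur.reverse :: splitSimple t [] else splitSimple t (c :: cur)

-- proof-only spec of B's scan from a given flag
def gScan : Bool → List Char → List Char
  | _, [] => []
  | b, c :: t =>
    if c = '_' then gScan true t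
    else (if b then PySem.Chars.upperChar c else PySem.Chars.lowerChar c) :: gScan false t

theorem splitOn_go_step (f : Nat) (c : Char) (t cur : List Char) (acc : List (List Char)) :
    PySem.Chars.splitOn.go ['_'] (f+1) (c::t) cur acc =
      if ['_'].isPrefixOf (c::t) then PySem.Chars.splitOn.go ['_'] f (List.drop 1 (c::t)) [] (cur.reverse :: acc)
      else PySem.Chars.splitOn.go ['_'] f t (c :: cur) acc := by
  simp [PySem.Chars.splitOn.go]

theorem splitOn_go_eq (l : List Char) : ∀ (fuel : Nat) (cur : List Char) (acc : List (List Char)),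
    l.length < fuel →
    PySem.Chars.splitOn.go ['_'] fuel l cur acc = acc.reverse ++ splitSimple l cur := by
  induction l with
  | nil =>
      intro fuel cur acc h
      match fuel with
      | f + 1 => simp [PySem.Chars.splitOn.go, splitSimple]
  | cons c t ih =>
      intro fuel cur acc h
      match fuel with
      | f + 1 =>
        have hfit : t.length < f := by simpa using Nat.lt_of_succ_lt_succ h
        rw [splitOn_go_step]
        by_cases hc : c = '_'
        · subst hc
          rw [if_pos (by simp [List.isPrefixOf])]
          simp [splitSimple, ih f [] (cur.reverse :: acc) hfit]
        · rw [if_neg (by simp [List.isPrefixOf]; exact fun hh => hc hh.symm)]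
          rw [ih f (c :: cur) acc hfit]
          simp [splitSimple, hc]

theorem splitOn_eq_splitSimple (l : List Char) :
    PySem.Chars.splitOn l ['_'] = splitSimple l [] := by
  simp [PySem.Chars.splitOn, splitOn_go_eq l (l.length + 1) [] [] (Nat.lt_succ_self _)]

theorem flatten_intersperse_nil (xs : List (List Char)) :
    (List.intersperse ([] : List Char) xs).flatten = xs.flatten := by
  induction xs with
  | nil => simp
  | cons x xs ih =>
      cases xs with
      | nil => simp
      | cons y t => simpa [List.intersperse] using ih

theorem join_nil_eq_flatten (xs : List (List Char)) :
    PySem.Chars.join [] xs = xs.flatten := by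
  simp [PySem.Chars.join, List.intercalate, flatten_intersperse_nil]

-- A-side postprocessing of the parts
def joinCaps (parts : List (List Char)) : List Char :=
  PySem.Chars.join [] ((parts.filter (fun p => p ≠ [])).map pyCapitalize)

theorem joinCaps_cons (p : List Char) (ps : List (List Char)) :
    joinCaps (p :: ps) = pyCapitalize p ++ joinCaps ps := by
  by_cases hp : p = []
  · simp [joinCaps, hp, pyCapitalize]
  · simp [joinCaps, hp, join_nil_eq_flatten]

theorem joinCaps_splitSimple (t : List Char) : ∀ cur : List Char,
    joinCaps (splitSimple t cur) =
      (if cur.isEmpty then gScan true t else pyCapitalize cur.reverse ++ gScan false t) := by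
  induction t with
  | nil =>
      intro cur
      cases cur with
      | nil => simp [splitSimple, gScan, joinCaps]
      | cons d ds => simp [splitSimple, gScan, joinCaps]
  | cons c t ih =>
      intro cur
      by_cases hc : c = '_'
      · subst hc
        rw [splitSimple, if_pos rfl, joinCaps_cons, ih []]
        cases cur with
        | nil => simp [gScan, pyCapitalize]
        | cons d ds => simp [gScan]
      · rw [splitSimple, if_neg hc, ih (c :: cur)]
        cases hcur : cur.reverse with
        | nil =>
            have : cur = [] := by simpa using congrArg List.reverse hcur
            subst this
            simp [gScan, hc, pyCapitalize, PySem.Chars.lower]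
        | cons d ds =>
            have hne : cur ≠ [] := by
              intro h; rw [h] at hcur; simp at hcur
            have : (c :: cur).reverse = d :: (ds ++ [c]) := by simp [hcur]
            simp [gScan, hc, hne, this, pyCapitalize, PySem.Chars.lower]

theorem foldl_altStep (t : List Char) : ∀ (acc : List Char) (b : Bool),
    (t.foldl altStep (acc, b)).1 = acc ++ gScan b t := by
  induction t with
  | nil => intro acc b; simp [gScan]
  | cons c t ih =>
      intro acc b
      by_cases hc : c = '_'
      · simp [List.foldl, altStep, hc, ih, gScan]
      · simp [List.foldl, altStep, hc, ih, gScan]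

-- ===== VERDICT (by name: the statement is the Claim_ definition above) =====
theorem function_name_to_trait_name_spec : Claim_equal_function_name_to_trait_name := by
  intro s _ _
  unfold Spec_function_name_to_trait_name function_name_to_trait_name function_name_to_trait_name_alt
  by_cases h1 : s = "__construct"
  · simp [h1]
  · rw [if_neg h1, if_neg h1]
    by_cases h2 : PySem.Str.isIn "_" s = false
    · rw [if_pos h2, if_pos h2]
    · rw [if_neg h2, if_neg h2]
      have hsep : ("_" : String).toList = ['_'] := by decide
      rw [hsep, splitOn_eq_splitSimple, foldl_altStep]
      have key := joinCaps_splitSimple s.toList []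
      simp only [List.isEmpty_nil, if_pos] at key
      simp only [joinCaps] at key
      simp only [List.nil_append]
      congr 1
      simpa using key
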